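-- pv_equiv track=rewrite | github.com/io-fault/python | route/library.py | _relative_resolution
-- ===== SOURCE A (Python) =====
-- def _relative_resolution(points, len=len):
-- 	"""
-- 	# Resolve points identified as self points, `.`, and container points, `..`.
--
-- 	# Used by &Route subclasses to support relative paths; this method should not be used
-- 	# directly.
-- 	"""
-- 	rob = []
-- 	add = rob.append
-- 	parent_count = 0
--
-- 	for x in points:
-- 		if not x or x == '.':
-- 			continue
-- 		elif x == '..':
-- 			parent_count += 1
-- 		else:
-- 			if parent_count:
-- 				del rob[-parent_count:]
-- 				parent_count = 0
-- 			add(x)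
-- 	else:
-- 		if parent_count:
-- 			del rob[-parent_count:]
--
-- 	return rob
-- ===== SOURCE B (Python) =====
-- def _relative_resolution(points, len=len):
--     rob = []
--     for x in points:
--         if not x or x == '.':
--             continue
--         elif x == '..':
--             if rob:
--                 rob.pop()
--         else:
--             rob.append(x)
--     return rob
-- ===== Notes on version B (the rewrite author's own statement) =====
-- stated objective: simpler
-- what changed: Drops the parent_count accumulator, the batch del rob[-parent_count:] and the for-else clause; a single pass acts on each component immediately, popping the result list on '..'.
import Mathlib
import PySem

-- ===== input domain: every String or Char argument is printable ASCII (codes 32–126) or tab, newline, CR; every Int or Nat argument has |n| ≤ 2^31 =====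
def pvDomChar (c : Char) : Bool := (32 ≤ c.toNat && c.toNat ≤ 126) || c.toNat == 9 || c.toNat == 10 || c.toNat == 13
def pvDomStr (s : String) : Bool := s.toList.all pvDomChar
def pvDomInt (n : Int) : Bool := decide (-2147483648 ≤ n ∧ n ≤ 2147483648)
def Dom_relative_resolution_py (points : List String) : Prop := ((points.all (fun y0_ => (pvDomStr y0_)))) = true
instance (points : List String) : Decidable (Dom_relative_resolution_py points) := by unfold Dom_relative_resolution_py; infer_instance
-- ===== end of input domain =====

-- B drops the parent_count accumulator and batch slice-delete, popping the result list immediately on '..' (simpler).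


-- ===== PORT A =====
-- A's loop: state (rob, parent_count); 'del rob[-parent_count:]' (parent_count ≥ 1) keeps the
-- first rob.length - parent_count elements (Nat subtraction clamps exactly like Python's slice).
def relative_resolution_py (points : List String) : List String :=
  let st := points.foldl (fun (s : List String × Nat) x =>
    if x = "" ∨ x = "." then s
    else if x = ".." then (s.1, s.2 + 1)
    else if s.2 ≠ 0 then (s.1.take (s.1.length - s.2) ++ [x], 0)
    else (s.1 ++ [x], 0)) ([], 0)
  if st.2 ≠ 0 then st.1.take (st.1.length - st.2) else st.1

-- ===== PORT B =====
def relative_resolution_py_alt (points : List String) : List String :=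
  points.foldl (fun rob x =>
    if x = "" ∨ x = "." then rob
    else if x = ".." then (if rob = [] then rob else rob.dropLast)
    else rob ++ [x]) []

-- ===== PRECONDITION & SPEC =====
def Spec_relative_resolution_py (points : List String) (out : List String) : Prop := out = relative_resolution_py_alt points
instance (points : List String) (out : List String) : Decidable (Spec_relative_resolution_py points out) := by unfold Spec_relative_resolution_py; infer_instance

-- ===== CLAIM (what is proved, stated in full; the proofs are below) =====
def Claim_equal_relative_resolution_py : Prop := ∀ (points : List String), Dom_relative_resolution_py points → Spec_relative_resolution_py points (relative_resolution_py points)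

-- ===== LEMMAS AND PROOFS =====

theorem pv_dropLast_take (l : List String) (n : Nat) (h : n ≤ l.length) :
    (l.take n).dropLast = l.take (n - 1) := by
  rw [List.dropLast_eq_take, List.take_take, List.length_take]
  congr 1
  omega

theorem pv_if_dropLast (l : List String) :
    (if l = [] then l else l.dropLast) = l.dropLast := by
  split <;> simp_all

-- Loop invariant: B's accumulator equals A's rob with the pending parent_count deleted.
theorem pv_finish (st : List String × Nat) :
    (if st.2 ≠ 0 then st.1.take (st.1.length - st.2) else st.1) = st.1.take (st.1.length - st.2) := by
  split
  · rfl
  · simp_all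

theorem pv_inv (points : List String) (rob : List String) (pc : Nat) :
    points.foldl (fun rob x =>
      if x = "" ∨ x = "." then rob
      else if x = ".." then (if rob = [] then rob else rob.dropLast)
      else rob ++ [x]) (rob.take (rob.length - pc)) =
    (let st := points.foldl (fun (s : List String × Nat) x =>
      if x = "" ∨ x = "." then s
      else if x = ".." then (s.1, s.2 + 1)
      else if s.2 ≠ 0 then (s.1.take (s.1.length - s.2) ++ [x], 0)
      else (s.1 ++ [x], 0)) (rob, pc)
     st.1.take (st.1.length - st.2)) := by
  induction points generalizing rob pc with
  | nil => simp
  | cons x xs ih =>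
    simp only [List.foldl_cons]
    by_cases h1 : x = "" ∨ x = "."
    · rw [if_pos h1, if_pos h1]; exact ih rob pc
    · by_cases h2 : x = ".."
      · rw [if_neg h1, if_neg h1, if_pos h2, if_pos h2, pv_if_dropLast,
          pv_dropLast_take _ _ (by omega)]
        have hn : rob.length - pc - 1 = rob.length - (pc + 1) := by omega
        rw [hn]; exact ih rob (pc + 1)
      · rw [if_neg h1, if_neg h1, if_neg h2, if_neg h2]
        by_cases h3 : pc ≠ 0
        · rw [if_pos h3]
          have ih' := ih (rob.take (rob.length - pc) ++ [x]) 0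
          rwa [Nat.sub_zero, List.take_length] at ih'
        · rw [if_neg h3]
          have hpc : pc = 0 := by omega
          subst hpc
          rw [Nat.sub_zero, List.take_length]
          have ih' := ih (rob ++ [x]) 0
          rwa [Nat.sub_zero, List.take_length] at ih'

-- ===== VERDICT (by name: the statement is the Claim_ definition above) =====
theorem relative_resolution_py_spec : Claim_equal_relative_resolution_py := by
  intro points _
  unfold Spec_relative_resolution_py relative_resolution_py relative_resolution_py_alt
  have h := pv_inv points [] 0
  simp only [List.length_nil, Nat.sub_zero, List.take_nil] at h
  simp only [pv_finish]
  exact h.symm
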